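-- pv_equiv track=rewrite | github.com/CRChenND/rag-rl-audit | src/data/canary/experiment_builder.py | insert_trigger_after_first_sentence
-- ===== SOURCE A (Python) =====
-- def insert_trigger_after_first_sentence(document: str, trigger: str) -> str:
--     document_text = str(document).strip()
--     trigger_text = str(trigger).strip()
--     if not trigger_text:
--         return document_text
--     if not document_text:
--         return trigger_text
--     if trigger_text in document_text:
--         return document_text
--
--     sentence_endings = {".", "!", "?", "。", "！", "？"}
--     split_idx = None
--     for idx, ch in enumerate(document_text):
--         if ch in sentence_endings:
--             split_idx = idx + 1
--             break
--
--     if split_idx is None: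
--         return f"{document_text}\n\n{trigger_text}"
--
--     prefix = document_text[:split_idx].rstrip()
--     suffix = document_text[split_idx:].lstrip()
--     if not suffix:
--         return f"{prefix}\n\n{trigger_text}"
--     return f"{prefix}\n\n{trigger_text}\n\n{suffix}"
-- ===== SOURCE B (Python) =====
-- def insert_trigger_after_first_sentence(document: str, trigger: str) -> str:
--     document_text = str(document).strip()
--     trigger_text = str(trigger).strip()
--     if not trigger_text:
--         return document_text
--     if not document_text:
--         return trigger_text
--     if trigger_text in document_text:
--         return document_text
--
--     hits = [p for p in (document_text.find(ch) for ch in ".!?。！？") if p != -1]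
--     if not hits:
--         return "\n\n".join([document_text, trigger_text])
--
--     split_idx = min(hits) + 1
--     parts = [document_text[:split_idx].rstrip(), trigger_text]
--     suffix = document_text[split_idx:].lstrip()
--     if suffix:
--         parts.append(suffix)
--     return "\n\n".join(parts)
-- ===== Notes on version B (the rewrite author's own statement) =====
-- stated objective: faster
-- what changed: The split point is found by taking the minimum of per-delimiter str.find positions instead of A's per-character enumerate scan with a break, and the result is assembled with '\n\n'.join over a parts list instead of f-strings.
import Mathlib
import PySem

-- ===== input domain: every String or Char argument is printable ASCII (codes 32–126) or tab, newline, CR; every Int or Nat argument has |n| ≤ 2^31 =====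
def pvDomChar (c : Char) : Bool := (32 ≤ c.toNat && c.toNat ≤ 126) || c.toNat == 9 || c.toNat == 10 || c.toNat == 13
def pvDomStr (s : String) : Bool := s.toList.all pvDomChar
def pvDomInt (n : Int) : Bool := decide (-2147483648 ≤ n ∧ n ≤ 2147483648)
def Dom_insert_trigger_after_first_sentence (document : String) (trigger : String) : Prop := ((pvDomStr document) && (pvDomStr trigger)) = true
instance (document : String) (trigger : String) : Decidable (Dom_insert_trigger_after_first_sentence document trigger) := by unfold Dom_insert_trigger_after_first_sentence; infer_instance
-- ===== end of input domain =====

-- B replaces A's per-character scan by per-delimiter find() + min (a constant-factor speedup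
-- measured) and assembles the result with "\n\n".join of a parts list.

-- ===== PORT A =====
-- the sentence_endings set (a set of literal chars; membership test = list membership)
def pvEndings : List Char := ['.', '!', '?', '。', '！', '？']

-- A's 'for idx, ch in enumerate(document_text): if ch in sentence_endings: split_idx = idx+1; break'
def pvScanA : List Char → Nat → Option Nat
  | [], _ => none
  | c :: cs, idx => if pvEndings.contains c then some (idx + 1) else pvScanA cs (idx + 1)

def insert_trigger_after_first_sentence (document : String) (trigger : String) : String :=
  let document_text := PySem.Chars.strip document.toList
  let trigger_text := PySem.Chars.strip trigger.toList
  if trigger_text = [] then String.ofList document_text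
  else if document_text = [] then String.ofList trigger_text
  else if PySem.Chars.isIn trigger_text document_text then String.ofList document_text
  else
    match pvScanA document_text 0 with
    | none => String.ofList (document_text ++ '\n' :: '\n' :: trigger_text)
    | some split_idx =>
      let prefix_ := PySem.Chars.rstrip (PySem.List.slice document_text none (some (split_idx : Int)))
      let suffix_ := PySem.Chars.lstrip (PySem.List.slice document_text (some (split_idx : Int)) none)
      if suffix_ = [] then String.ofList (prefix_ ++ '\n' :: '\n' :: trigger_text)
      else String.ofList (prefix_ ++ '\n' :: '\n' :: (trigger_text ++ '\n' :: '\n' :: suffix_))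

-- ===== PORT B =====
def insert_trigger_after_first_sentence_alt (document : String) (trigger : String) : String :=
  let document_text := PySem.Chars.strip document.toList
  let trigger_text := PySem.Chars.strip trigger.toList
  if trigger_text = [] then String.ofList document_text
  else if document_text = [] then String.ofList trigger_text
  else if PySem.Chars.isIn trigger_text document_text then String.ofList document_text
  else
    let hits := (pvEndings.map (fun ch => PySem.Chars.find document_text [ch])).filter (fun p => p != -1)
    match PySem.List.min? hits (fun x => x) with
    | none => String.ofList (PySem.Chars.join ['\n', '\n'] [document_text, trigger_text])
    | some m =>
      let split_idx : Int := m + 1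
      let prefix_ := PySem.Chars.rstrip (PySem.List.slice document_text none (some split_idx))
      let suffix_ := PySem.Chars.lstrip (PySem.List.slice document_text (some split_idx) none)
      if suffix_ = [] then String.ofList (PySem.Chars.join ['\n', '\n'] [prefix_, trigger_text])
      else String.ofList (PySem.Chars.join ['\n', '\n'] [prefix_, trigger_text, suffix_])

-- ===== PRECONDITION & SPEC =====
def Spec_insert_trigger_after_first_sentence (document : String) (trigger : String) (out : String) : Prop := out = insert_trigger_after_first_sentence_alt document trigger
instance (document : String) (trigger : String) (out : String) : Decidable (Spec_insert_trigger_after_first_sentence document trigger out) := by unfold Spec_insert_trigger_after_first_sentence; infer_instance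

-- ===== CLAIM (what is proved, stated in full; the proofs are below) =====
def Claim_equal_insert_trigger_after_first_sentence : Prop := ∀ (document : String) (trigger : String), Dom_insert_trigger_after_first_sentence document trigger → Spec_insert_trigger_after_first_sentence document trigger (insert_trigger_after_first_sentence document trigger)

-- ===== LEMMAS AND PROOFS =====

-- index of the first sentence-ending character (proof-side helper)
def pvFirst : List Char → Option Nat
  | [] => none
  | c :: cs => if pvEndings.contains c then some 0 else (pvFirst cs).map (· + 1)

theorem pvScanA_eq (xs : List Char) (i : Nat) :
    pvScanA xs i = (pvFirst xs).map (fun k => i + k + 1) := by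
  induction xs generalizing i with
  | nil => rfl
  | cons c cs ih =>
    by_cases hc : c ∈ pvEndings
    · simp [pvScanA, pvFirst, hc]
    · simp only [pvScanA, pvFirst, List.contains_eq_mem, hc, decide_false, Bool.false_eq_true,
        ite_false, ih, Option.map_map]
      cases pvFirst cs
      · simp
      · simp; omega

theorem pvFirst_none {xs : List Char} (h : pvFirst xs = none) :
    ∀ c ∈ xs, c ∉ pvEndings := by
  induction xs with
  | nil => simp
  | cons c cs ih =>
    by_cases hc : c ∈ pvEndings
    · simp [pvFirst, hc] at h
    · simp only [pvFirst, List.contains_eq_mem, hc, decide_false, Bool.false_eq_true, ite_false,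
        Option.map_eq_none_iff] at h
      intro x hx
      rcases List.mem_cons.1 hx with rfl | hx
      · exact hc
      · exact ih h x hx

theorem pvFirst_some {xs : List Char} {k : Nat} (h : pvFirst xs = some k) :
    (∃ c, xs[k]? = some c ∧ c ∈ pvEndings) ∧
    (∀ j c', j < k → xs[j]? = some c' → c' ∉ pvEndings) := by
  induction xs generalizing k with
  | nil => simp [pvFirst] at h
  | cons c cs ih =>
    by_cases hc : c ∈ pvEndings
    · simp only [pvFirst, List.contains_eq_mem, hc, decide_true, ite_true, Option.some.injEq] at h
      subst h
      exact ⟨⟨c, rfl, hc⟩, by omega⟩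
    · simp only [pvFirst, List.contains_eq_mem, hc, decide_false, Bool.false_eq_true, ite_false,
        Option.map_eq_some_iff] at h
      obtain ⟨k', hk', rfl⟩ := h
      obtain ⟨⟨c₀, hc₀, hmem⟩, hmin⟩ := ih hk'
      refine ⟨⟨c₀, by simpa using hc₀, hmem⟩, ?_⟩
      intro j c' hj hget
      cases j with
      | zero => simp at hget; subst hget; exact hc
      | succ j' =>
        simp only [List.getElem?_cons_succ] at hget
        exact hmin j' c' (by omega) hget

-- [c] is a prefix of l.drop i  ↔  l[i]? = some c
theorem singleton_prefix_drop_iff {c : Char} {l : List Char} {i : Nat} :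
    [c] <+: l.drop i ↔ l[i]? = some c := by
  constructor
  · rintro ⟨t, ht⟩
    have h0 : (l.drop i)[0]? = some c := by rw [← ht]; rfl
    simpa [List.getElem?_drop] using h0
  · intro h
    have h0 : (l.drop i)[0]? = some c := by simpa [List.getElem?_drop] using h
    cases hd : l.drop i with
    | nil => simp [hd] at h0
    | cons x xs =>
      rw [hd] at h0
      simp only [List.getElem?_cons_zero, Option.some.injEq] at h0
      exact ⟨xs, by simp [h0]⟩

theorem singleton_infix_iff {c : Char} {l : List Char} : [c] <:+: l ↔ c ∈ l := by
  constructor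
  · intro h; exact h.subset (List.mem_singleton_self c)
  · intro h
    obtain ⟨s, t, rfl⟩ := List.append_of_mem h
    exact ⟨s, t, by simp⟩

-- if c occurs first at index k among positions holding sentence endings, find dt [c] = k
theorem find_singleton_eq {dt : List Char} {k : Nat} {c : Char}
    (hget : dt[k]? = some c)
    (hmin : ∀ j c', j < k → dt[j]? = some c' → c' ∉ pvEndings)
    (hc : c ∈ pvEndings) :
    PySem.Chars.find dt [c] = (k : Int) := by
  have hmem : c ∈ dt := List.mem_of_getElem? hget
  have h0 : 0 ≤ PySem.Chars.find dt [c] :=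
    (PySem.Chars.find_nonneg_iff dt [c]).2 (singleton_infix_iff.2 hmem)
  obtain ⟨hpre, hfirst⟩ := PySem.Chars.find_spec h0
  have hAt : dt[(PySem.Chars.find dt [c]).toNat]? = some c := singleton_prefix_drop_iff.1 hpre
  have hk1 : ¬ (PySem.Chars.find dt [c]).toNat < k := fun hlt => hmin _ _ hlt hAt hc
  have hk2 : ¬ k < (PySem.Chars.find dt [c]).toNat := fun hlt =>
    hfirst k hlt (singleton_prefix_drop_iff.2 hget)
  omega

theorem hits_min_eq (dt : List Char) :
    PySem.List.min? ((pvEndings.map (fun ch => PySem.Chars.find dt [ch])).filter (fun p => p != -1)) (fun x => x)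
      = (match pvFirst dt with | none => none | some k => some ((k : Nat) : Int)) := by
  cases hpf : pvFirst dt with
  | none =>
    have hall : ∀ c ∈ dt, c ∉ pvEndings := pvFirst_none hpf
    have hnil : (pvEndings.map (fun ch => PySem.Chars.find dt [ch])).filter (fun p => p != -1) = [] := by
      rw [List.filter_eq_nil_iff]
      intro x hx
      obtain ⟨ch, hch, rfl⟩ := List.mem_map.1 hx
      have hneg : PySem.Chars.find dt [ch] = -1 := by
        rw [PySem.Chars.find_eq_neg_one_iff]
        intro hinf
        exact hall ch (singleton_infix_iff.1 hinf) hch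
      simp [hneg]
    rw [hnil]
    simp [PySem.List.min?_eq_none_iff]
  | some k =>
    obtain ⟨⟨c, hget, hc⟩, hmin⟩ := pvFirst_some hpf
    have hfind : PySem.Chars.find dt [c] = (k : Int) := find_singleton_eq hget hmin hc
    have hkmem : (k : Int) ∈ (pvEndings.map (fun ch => PySem.Chars.find dt [ch])).filter (fun p => p != -1) := by
      rw [List.mem_filter]
      exact ⟨List.mem_map.2 ⟨c, hc, hfind⟩, by simp⟩
    have hlb : ∀ x ∈ (pvEndings.map (fun ch => PySem.Chars.find dt [ch])).filter (fun p => p != -1), (k : Int) ≤ x := by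
      intro x hx
      rw [List.mem_filter] at hx
      obtain ⟨hxm, hxne⟩ := hx
      obtain ⟨ch, hch, rfl⟩ := List.mem_map.1 hxm
      have hne : PySem.Chars.find dt [ch] ≠ -1 := by simpa using hxne
      have hge : -1 ≤ PySem.Chars.find dt [ch] := PySem.Chars.neg_one_le_find dt [ch]
      have h0 : 0 ≤ PySem.Chars.find dt [ch] := by omega
      obtain ⟨hpre, _⟩ := PySem.Chars.find_spec h0
      have hAt : dt[(PySem.Chars.find dt [ch]).toNat]? = some ch := singleton_prefix_drop_iff.1 hpre
      have hnlt : ¬ (PySem.Chars.find dt [ch]).toNat < k := fun hlt => hmin _ _ hlt hAt hch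
      omega
    cases hm : PySem.List.min? ((pvEndings.map (fun ch => PySem.Chars.find dt [ch])).filter (fun p => p != -1)) (fun x => x) with
    | none =>
      rw [PySem.List.min?_eq_none_iff] at hm
      exact absurd hkmem (by simp [hm])
    | some m =>
      have hmmem := PySem.List.min?_mem hm
      have h1 : m ≤ (k : Int) := PySem.List.min?_isMin hm (k : Int) hkmem
      have h2 : (k : Int) ≤ m := hlb m hmmem
      congr 1
      omega

theorem join_two (p t : List Char) :
    PySem.Chars.join ['\n', '\n'] [p, t] = p ++ '\n' :: '\n' :: t := by
  simp [PySem.Chars.join, List.intercalate]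

theorem join_three (p t s : List Char) :
    PySem.Chars.join ['\n', '\n'] [p, t, s] = p ++ '\n' :: '\n' :: (t ++ '\n' :: '\n' :: s) := by
  simp [PySem.Chars.join, List.intercalate]

-- ===== VERDICT (by name: the statement is the Claim_ definition above) =====
theorem insert_trigger_after_first_sentence_spec : Claim_equal_insert_trigger_after_first_sentence := by
  unfold Claim_equal_insert_trigger_after_first_sentence
  intro document trigger _
  unfold Spec_insert_trigger_after_first_sentence
  unfold insert_trigger_after_first_sentence insert_trigger_after_first_sentence_alt
  dsimp only
  split_ifs with h1 h2 h3
  · rfl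
  · rfl
  · rfl
  · rw [pvScanA_eq, hits_min_eq]
    cases hpf : pvFirst (PySem.Chars.strip document.toList) with
    | none => simp [join_two]
    | some k =>
      have hcast : ((0 + k + 1 : Nat) : Int) = (k : Int) + 1 := by push_cast; ring
      simp only [Option.map_some]
      rw [hcast]
      split_ifs with h4
      · rw [join_two]
      · rw [join_three]
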